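-- pv_equiv track=rewrite | github.com/Vincent7140/Tracking-particle-flow-whith-openpiv | Frame_into_video.py | chunk_events_by_time
-- ===== SOURCE A (Python) =====
-- def chunk_events_by_time(t, time_window_ms):
--     chunks = []
--     start_idx = 0
--     end_time = t[0] + time_window_ms * 1000
--     for i in range(len(t)):
--         if t[i] >= end_time:
--             chunks.append((start_idx, i))
--             start_idx = i
--             end_time = t[i] + time_window_ms * 1000
--     chunks.append((start_idx, len(t)))
--     return chunks
-- ===== SOURCE B (Python) =====
-- def chunk_events_by_time(t, time_window_ms):
--     # block-maximum index: one precompute pass, then boundary search skips whole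
--     # blocks whose maximum is below the chunk-end threshold
--     w = time_window_ms * 1000
--     n = len(t)
--     BS = 64
--     nb = (n + BS - 1) // BS
--     bmax = [max(t[64 * b:64 * b + 64]) for b in range(nb)]
--
--     def next_ge(x, i):
--         # first index j >= i with t[j] >= x, else n
--         while i < n:
--             if i % BS == 0 and bmax[i // BS] < x:
--                 i += BS
--             elif t[i] >= x:
--                 return i
--             else:
--                 i += 1
--         return n
--
--     chunks = []
--     s = 0
--     b = next_ge(t[0] + w, 0)
--     while b < n:
--         chunks.append((s, b))
--         s = b
--         b = next_ge(t[b] + w, b + 1)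
--     chunks.append((s, n))
--     return chunks
-- ===== Notes on version B (the rewrite author's own statement) =====
-- stated objective: alternative
-- what changed: B precomputes a block-maximum index (blocks of 64) in a separate pass and then finds each next chunk boundary by skipping whole blocks whose maximum is below the threshold, scanning elements only inside candidate blocks, instead of A's single element-by-element scan threading (chunks, start_idx, end_time); Pre_ only excludes the empty list, on which A raises IndexError at t[0].
import Mathlib
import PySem

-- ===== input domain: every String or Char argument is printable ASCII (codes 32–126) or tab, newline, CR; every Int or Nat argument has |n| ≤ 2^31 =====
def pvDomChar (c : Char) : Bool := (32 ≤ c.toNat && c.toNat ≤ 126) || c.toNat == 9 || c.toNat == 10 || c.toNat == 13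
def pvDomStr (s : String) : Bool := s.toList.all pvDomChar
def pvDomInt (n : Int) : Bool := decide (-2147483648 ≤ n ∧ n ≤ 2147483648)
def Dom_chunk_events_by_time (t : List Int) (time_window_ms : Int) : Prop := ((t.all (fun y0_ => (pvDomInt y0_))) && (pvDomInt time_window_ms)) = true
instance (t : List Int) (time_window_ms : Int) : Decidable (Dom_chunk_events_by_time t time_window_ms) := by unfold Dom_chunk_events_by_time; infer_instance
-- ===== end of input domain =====

-- B precomputes a block-maximum index and finds each next chunk boundary by skipping whole
-- blocks below the threshold, instead of A's element-by-element scan (objective: alternative).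

-- ===== PORT A =====
-- loop body of A's `for i in range(len(t))`; t[i] is in range for every i the loop visits,
-- so pyGetD with an arbitrary default is exact there
def pvStepA (t : List Int) (w : Int) (st : List (Int × Int) × Int × Int) (i : Int) :
    List (Int × Int) × Int × Int :=
  let ti := PySem.List.pyGetD t i 0
  if st.2.2 ≤ ti then (st.1 ++ [(st.2.1, i)], i, ti + w) else st

def chunk_events_by_time (t : List Int) (time_window_ms : Int) : List (Int × Int) :=
  let w := time_window_ms * 1000
  -- t[0] raises IndexError on empty t: excluded by Pre_; pyGetD's default is never read inside Pre_
  let r := (PySem.List.pyRange 0 (t.length : Int) 1).foldl (pvStepA t w)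
              ([], 0, PySem.List.pyGetD t 0 0 + w)
  r.1 ++ [(r.2.1, (t.length : Int))]

-- ===== PORT B =====
-- Source B's bmax: maximum of each 64-block (max() on a nonempty slice; .getD 0 is never read
-- since every block with index < nb is nonempty)
def pvBMax (t : List Int) : List Int :=
  (List.range ((t.length + 63) / 64)).map
    (fun b => (PySem.List.max?
        (PySem.List.slice t (some ((64 * b : Nat) : Int)) (some ((64 * b + 64 : Nat) : Int)))
        (fun y => y)).getD 0)

-- Source B's next_ge: first index j ≥ i with t[j] ≥ x, else len t; skips a whole block when it
-- stands at a block start and the block's maximum is below x. Structural recursion on a fuel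
-- that starts above the iteration count (i strictly increases each step), so the fuel-0
-- branch is never reached; bmax.getD and t.getD are exact since their indices are in range
def pvNextGe (t : List Int) (bmax : List Int) (x : Int) : Nat → Nat → Nat
  | 0, _i => t.length
  | fuel + 1, i =>
    if i < t.length then
      if i % 64 = 0 ∧ bmax.getD (i / 64) 0 < x then pvNextGe t bmax x fuel (i + 64)
      else if x ≤ t.getD i 0 then i
      else pvNextGe t bmax x fuel (i + 1)
    else t.length

-- Source B's `while b < n` loop appending (s, b) pairs; fuel starts at len(t) + 1, which bounds
-- the iteration count since b strictly increases, so the fuel-0 branch is never reached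
def pvLoopBGo (t : List Int) (w : Int) (bmax : List Int) :
    Nat → Nat → Nat → List (Int × Int) → List (Int × Int)
  | 0, s, _b, acc => acc ++ [((s : Int), (t.length : Int))]
  | fuel + 1, s, b, acc =>
    if b < t.length then
      pvLoopBGo t w bmax fuel b (pvNextGe t bmax (t.getD b 0 + w) (t.length + 1) (b + 1))
        (acc ++ [((s : Int), (b : Int))])
    else acc ++ [((s : Int), (t.length : Int))]

def chunk_events_by_time_alt (t : List Int) (time_window_ms : Int) : List (Int × Int) :=
  let w := time_window_ms * 1000
  let bmax := pvBMax t
  -- t[0] raises IndexError on empty t: excluded by Pre_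
  pvLoopBGo t w bmax (t.length + 1) 0 (pvNextGe t bmax (PySem.List.pyGetD t 0 0 + w) (t.length + 1) 0) []

-- ===== PRECONDITION & SPEC =====
-- Pre_ excludes exactly the empty list, on which Python A (and B) raises IndexError at t[0]
def Pre_chunk_events_by_time (t : List Int) (time_window_ms : Int) : Prop := t ≠ []
instance (t : List Int) (time_window_ms : Int) : Decidable (Pre_chunk_events_by_time t time_window_ms) := by unfold Pre_chunk_events_by_time; infer_instance

def pvWitness_chunk_events_by_time : List Int × Int := ([10, 3000, 4000, 9000], 2)

def Spec_chunk_events_by_time (t : List Int) (time_window_ms : Int) (out : List (Int × Int)) : Prop := out = chunk_events_by_time_alt t time_window_ms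
instance (t : List Int) (time_window_ms : Int) (out : List (Int × Int)) : Decidable (Spec_chunk_events_by_time t time_window_ms out) := by unfold Spec_chunk_events_by_time; infer_instance

-- ===== CLAIM (what is proved, stated in full; the proofs are below) =====
def Claim_equal_chunk_events_by_time : Prop := ∀ (t : List Int) (time_window_ms : Int), Dom_chunk_events_by_time t time_window_ms → Pre_chunk_events_by_time t time_window_ms → Spec_chunk_events_by_time t time_window_ms (chunk_events_by_time t time_window_ms)

-- ===== LEMMAS AND PROOFS =====

-- common recursive characterisation: chunks produced scanning from index k with current
-- chunk start s (whose end time is t[s] + w)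
def pvGSpec (t : List Int) (w : Int) (k s : Nat) : List (Int × Int) :=
  if k < t.length then
    if t.getD s 0 + w ≤ t.getD k 0 then ((s : Int), (k : Int)) :: pvGSpec t w (k + 1) k
    else pvGSpec t w (k + 1) s
  else [((s : Int), (t.length : Int))]
termination_by t.length - k

theorem pvA_fold (t : List Int) (w : Int) (k s : Nat) (acc : List (Int × Int)) :
    (let r := (PySem.List.pyRange (k : Int) (t.length : Int) 1).foldl (pvStepA t w)
                (acc, (s : Int), t.getD s 0 + w)
     r.1 ++ [(r.2.1, (t.length : Int))]) = acc ++ pvGSpec t w k s := by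
  by_cases h : k < t.length
  · rw [PySem.List.pyRange_one_cons (by exact_mod_cast h)]
    simp only [List.foldl_cons]
    unfold pvGSpec
    rw [if_pos h]
    by_cases hc : t.getD s 0 + w ≤ t.getD k 0
    · have hstep : pvStepA t w (acc, (s : Int), t.getD s 0 + w) (k : Int)
          = (acc ++ [((s : Int), (k : Int))], (k : Int), t.getD k 0 + w) := by
        have hc' : t[s]?.getD 0 + w ≤ t[k]?.getD 0 := by
          rwa [List.getD_eq_getElem?_getD, List.getD_eq_getElem?_getD] at hc
        simp [pvStepA, PySem.List.pyGetD_natCast, List.getD_eq_getElem?_getD, hc']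
      rw [hstep]
      have hcast : ((k : Int) + 1) = ((k + 1 : Nat) : Int) := by push_cast; ring
      rw [hcast, if_pos hc]
      rw [pvA_fold t w (k + 1) k (acc ++ [((s : Int), (k : Int))])]
      simp
    · have hstep : pvStepA t w (acc, (s : Int), t.getD s 0 + w) (k : Int)
          = (acc, (s : Int), t.getD s 0 + w) := by
        have hc' : ¬ t[s]?.getD 0 + w ≤ t[k]?.getD 0 := by
          rwa [List.getD_eq_getElem?_getD, List.getD_eq_getElem?_getD] at hc
        simp [pvStepA, PySem.List.pyGetD_natCast, List.getD_eq_getElem?_getD, hc']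
      rw [hstep]
      have hcast : ((k : Int) + 1) = ((k + 1 : Nat) : Int) := by push_cast; ring
      rw [hcast, if_neg hc]
      exact pvA_fold t w (k + 1) s acc
  · have hrange : PySem.List.pyRange (k : Int) (t.length : Int) 1 = [] := by
      simp [PySem.List.pyRange]
      omega
    rw [hrange]
    unfold pvGSpec
    rw [if_neg h]
    simp
termination_by t.length - k

-- linear "first index j ≥ i with t[j] ≥ x, else len t" — the reference the block search meets
def pvFirstGe (t : List Int) (x : Int) (i : Nat) : Nat :=
  if i < t.length then
    if t.getD i 0 < x then pvFirstGe t x (i + 1) else i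
  else i
termination_by t.length - i

theorem pvFirstGe_stop (t : List Int) (x : Int) (lo : Nat)
    (h : lo < t.length → x ≤ t.getD lo 0) : pvFirstGe t x lo = lo := by
  unfold pvFirstGe
  by_cases hlt : lo < t.length
  · rw [if_pos hlt, if_neg (not_lt.mpr (h hlt))]
  · rw [if_neg hlt]

theorem pvFirstGe_skip (t : List Int) (x : Int) (lo mid : Nat)
    (hmid : mid < t.length) (hlo : lo ≤ mid + 1)
    (hall : ∀ k, lo ≤ k → k ≤ mid → t.getD k 0 < x) :
    pvFirstGe t x lo = pvFirstGe t x (mid + 1) := by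
  by_cases h : lo = mid + 1
  · rw [h]
  · have hlo' : lo ≤ mid := by omega
    have hlt : lo < t.length := lt_of_le_of_lt hlo' hmid
    conv_lhs => rw [pvFirstGe]
    rw [if_pos hlt, if_pos (hall lo (le_refl _) hlo')]
    exact pvFirstGe_skip t x (lo + 1) mid hmid (by omega) (fun k hk1 hk2 => hall k (by omega) hk2)
termination_by mid + 1 - lo
decreasing_by omega

-- the bmax entry of the block holding i bounds every element of that block
theorem pvBlock_lt (t : List Int) (x : Int) (i : Nat) (hi : i < t.length)
    (hmod : i % 64 = 0) (hlt : (pvBMax t).getD (i / 64) 0 < x) :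
    ∀ k, i ≤ k → k < min (i + 64) t.length → t.getD k 0 < x := by
  intro k hk1 hk2
  have hib : 64 * (i / 64) = i := by omega
  have hb : i / 64 < (t.length + 63) / 64 := by omega
  have hslice : PySem.List.slice t (some ((64 * (i / 64) : Nat) : Int))
      (some ((64 * (i / 64) + 64 : Nat) : Int)) = (t.drop i).take 64 := by
    rw [PySem.List.slice_natCast]
    rw [hib]
    congr 1
    omega
  have hget : (pvBMax t).getD (i / 64) 0
      = (PySem.List.max? ((t.drop i).take 64) (fun y => y)).getD 0 := by
    unfold pvBMax
    rw [List.getD_eq_getElem _ _ (by simpa using hb)]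
    rw [List.getElem_map]
    rw [List.getElem_range]
    rw [hslice]
  have hne : (t.drop i).take 64 ≠ [] := by
    have : ((t.drop i).take 64).length = min 64 (t.length - i) := by
      simp [List.length_take, List.length_drop]
    intro hcon
    rw [hcon] at this
    simp at this
    omega
  obtain ⟨m, hm⟩ : ∃ m, PySem.List.max? ((t.drop i).take 64) (fun y => y) = some m := by
    rcases hop : PySem.List.max? ((t.drop i).take 64) (fun y => y) with _ | m
    · exact absurd ((PySem.List.max?_eq_none_iff _ _).mp hop) hne
    · exact ⟨m, rfl⟩
  have hmx : m < x := by
    rw [hget, hm] at hlt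
    simpa using hlt
  have hmem : t.getD k 0 ∈ (t.drop i).take 64 := by
    have hk : k < t.length := by omega
    have hlen : k - i < ((t.drop i).take 64).length := by
      simp [List.length_take, List.length_drop]
      omega
    have : ((t.drop i).take 64)[k - i]'hlen = t[k]'hk := by
      rw [List.getElem_take, List.getElem_drop]
      congr 1
      omega
    rw [List.getD_eq_getElem t 0 hk, ← this]
    exact List.getElem_mem hlen
  exact lt_of_le_of_lt (PySem.List.max?_isMax hm _ hmem) hmx

-- Source B's block-skipping search equals the linear first-≥ index
theorem pvNextGe_eq_firstGe (t : List Int) (x : Int) (fuel : Nat) :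
    ∀ i : Nat, t.length - i < fuel →
    pvNextGe t (pvBMax t) x fuel i = pvFirstGe t x (min i t.length) := by
  induction fuel with
  | zero => intro i hf; omega
  | succ f ih =>
    intro i hf
    simp only [pvNextGe]
    by_cases h : i < t.length
    · rw [if_pos h]
      have hmin : min i t.length = i := by omega
      rw [hmin]
      by_cases hskip : i % 64 = 0 ∧ (pvBMax t).getD (i / 64) 0 < x
      · rw [if_pos hskip]
        rw [ih (i + 64) (by omega)]
        have hall := pvBlock_lt t x i h hskip.1 hskip.2
        have hmid : min (i + 64) t.length - 1 < t.length := by omega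
        have := pvFirstGe_skip t x i (min (i + 64) t.length - 1) hmid (by omega)
          (fun k hk1 hk2 => hall k hk1 (by omega))
        rw [this]
        congr 1
        omega
      · rw [if_neg hskip]
        by_cases hge : x ≤ t.getD i 0
        · rw [if_pos hge]
          exact (pvFirstGe_stop t x i (fun _ => hge)).symm
        · rw [if_neg hge]
          rw [ih (i + 1) (by omega)]
          have hmin1 : min (i + 1) t.length = i + 1 := by omega
          rw [hmin1]
          conv_rhs => rw [pvFirstGe]
          rw [if_pos h, if_pos (by omega)]
    · rw [if_neg h]
      have hmin : min i t.length = t.length := by omega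
      rw [hmin]
      exact (pvFirstGe_stop t x t.length (fun hc => absurd hc (by omega))).symm

-- B's loop, entered at the boundary found by searching from k, produces exactly pvGSpec
theorem pvLoopB_eq_gspec (t : List Int) (w : Int)
    (k s : Nat) (fuel : Nat) (hf : t.length - k < fuel) (acc : List (Int × Int)) :
    pvLoopBGo t w (pvBMax t) fuel s (pvFirstGe t (t.getD s 0 + w) k) acc
      = acc ++ pvGSpec t w k s := by
  match fuel, hf with
  | f + 1, hf =>
  by_cases h : k < t.length
  · by_cases hc : t.getD s 0 + w ≤ t.getD k 0
    · have hfg : pvFirstGe t (t.getD s 0 + w) k = k := by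
        unfold pvFirstGe; rw [if_pos h, if_neg (by omega)]
      rw [hfg]
      simp only [pvLoopBGo]
      rw [if_pos h]
      rw [pvNextGe_eq_firstGe t (t.getD k 0 + w) (t.length + 1) (k + 1) (by omega)]
      have hmin : min (k + 1) t.length = k + 1 := by omega
      rw [hmin]
      rw [pvLoopB_eq_gspec t w (k + 1) k f (by omega) (acc ++ [((s : Int), (k : Int))])]
      conv_rhs => rw [pvGSpec]
      rw [if_pos h, if_pos hc]
      simp
    · have hfg : pvFirstGe t (t.getD s 0 + w) k = pvFirstGe t (t.getD s 0 + w) (k + 1) := by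
        conv_lhs => rw [pvFirstGe]
        rw [if_pos h, if_pos (by omega)]
      rw [hfg, pvLoopB_eq_gspec t w (k + 1) s (f + 1) (by omega) acc]
      conv_rhs => rw [pvGSpec]
      rw [if_pos h, if_neg hc]
  · have hfg : pvFirstGe t (t.getD s 0 + w) k = k := by
      unfold pvFirstGe; rw [if_neg h]
    rw [hfg]
    simp only [pvLoopBGo]
    rw [if_neg h]
    conv_rhs => rw [pvGSpec]
    rw [if_neg h]
termination_by t.length - k

-- ===== VERDICT (by name: the statement is the Claim_ definition above) =====
theorem chunk_events_by_time_spec : Claim_equal_chunk_events_by_time := by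
  intro t tw _ hne
  unfold Spec_chunk_events_by_time
  have hA : chunk_events_by_time t tw = pvGSpec t (tw * 1000) 0 0 := by
    have h := pvA_fold t (tw * 1000) 0 0 []
    simp only [Nat.cast_zero] at h
    simpa [chunk_events_by_time, PySem.List.pyGetD_zero] using h
  have hB : chunk_events_by_time_alt t tw = pvGSpec t (tw * 1000) 0 0 := by
    have h := pvLoopB_eq_gspec t (tw * 1000) 0 0 (t.length + 1) (by omega) []
    simp only [List.nil_append] at h
    rw [← h]
    simp only [chunk_events_by_time_alt]
    rw [pvNextGe_eq_firstGe t _ (t.length + 1) 0 (by omega)]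
    simp [PySem.List.pyGetD_zero]
  rw [hA, hB]
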